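-- pv_equiv track=rewrite | github.com/kizuatograxia/pokem | tools/dex-importer/scripts/extract_charizard.py | untile
-- ===== SOURCE A (Python) =====
-- def untile(pixels: list[int], w_tiles: int, h_tiles: int) -> list[int]:
--     """Convert from tiled 8x8 block order to scanline order."""
--     w = w_tiles * 8
--     h = h_tiles * 8
--     out = [0] * (w * h)
--     i = 0
--     for ty in range(h_tiles):
--         for tx in range(w_tiles):
--             for py in range(8):
--                 for px in range(8):
--                     cy = ty * 8 + py
--                     cx = tx * 8 + px
--                     if i < len(pixels):
--                         out[cy * w + cx] = pixels[i]
--                     i += 1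
--     return out
-- ===== SOURCE B (Python) =====
-- def untile(pixels: list[int], w_tiles: int, h_tiles: int) -> list[int]:
--     """Convert from tiled 8x8 block order to scanline order.
--
--     Pull-based: walk the output in scanline order and fetch each pixel from
--     its source position in the tiled stream (cells past the stream stay 0).
--     """
--     w = w_tiles * 8
--     h = h_tiles * 8
--     n = len(pixels)
--     out = [0] * (w * h)
--     for cy in range(h):
--         for cx in range(w):
--             i = (cy // 8 * w_tiles + cx // 8) * 64 + (cy % 8) * 8 + cx % 8
--             if i < n:
--                 out[cy * w + cx] = pixels[i]
--     return out
-- ===== Notes on version B (the rewrite author's own statement) =====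
-- stated objective: alternative
-- what changed: A pushes pixels tile-by-tile with a running input counter into a preallocated output; B walks the output in scanline order and pulls each cell's pixel by computing its source index in the tiled stream (i = (cy//8*w_tiles + cx//8)*64 + (cy%8)*8 + cx%8), inverting the index mapping and removing the counter.
import Mathlib
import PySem

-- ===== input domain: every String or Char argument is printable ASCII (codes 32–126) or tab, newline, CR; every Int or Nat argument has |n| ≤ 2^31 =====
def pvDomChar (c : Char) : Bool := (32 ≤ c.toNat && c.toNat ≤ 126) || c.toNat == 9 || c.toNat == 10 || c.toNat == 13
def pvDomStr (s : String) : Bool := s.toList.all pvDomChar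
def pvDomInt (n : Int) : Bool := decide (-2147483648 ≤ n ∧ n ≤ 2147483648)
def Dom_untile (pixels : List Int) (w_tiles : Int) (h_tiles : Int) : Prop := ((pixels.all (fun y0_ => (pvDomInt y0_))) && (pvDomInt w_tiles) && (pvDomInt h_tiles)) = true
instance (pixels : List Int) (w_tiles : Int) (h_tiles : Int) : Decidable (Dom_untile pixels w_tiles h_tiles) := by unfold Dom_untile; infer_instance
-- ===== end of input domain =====

-- B replaces A's push-based tile-major copy (running input counter) by a pull-based scanline
-- traversal of the output that computes each cell's source index in the tiled stream; objective:
-- alternative (same cost, inverted index mapping, no counter state).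

-- ===== PORT A =====
-- innermost loop body of A: 'cy = ty*8+py; cx = tx*8+px; if i < len(pixels): out[cy*w+cx] = pixels[i]; i += 1'
-- (whenever the write/read happens both indices are nonnegative and in range, so pySetD/pyGetD are exact)
def untileStep (pixels : List Int) (w : Int) (ty tx py : Int) (s : List Int × Int) (px : Int) : List Int × Int :=
  let cy := ty * 8 + py
  let cx := tx * 8 + px
  let out := if s.2 < (pixels.length : Int) then
      PySem.List.pySetD s.1 (cy * w + cx) (PySem.List.pyGetD pixels s.2 0)
    else s.1
  (out, s.2 + 1)

def untile (pixels : List Int) (w_tiles : Int) (h_tiles : Int) : List Int :=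
  let w := w_tiles * 8
  let h := h_tiles * 8
  let out : List Int := List.replicate (w * h).toNat 0
  ((PySem.List.pyRange 0 h_tiles 1).foldl (fun s ty =>
    (PySem.List.pyRange 0 w_tiles 1).foldl (fun s tx =>
      (PySem.List.pyRange 0 8 1).foldl (fun s py =>
        (PySem.List.pyRange 0 8 1).foldl (untileStep pixels w ty tx py) s) s) s)
    (out, (0 : Int))).1

-- ===== PORT B =====
-- inner loop body of B: 'i = (cy//8*w_tiles + cx//8)*64 + (cy%8)*8 + cx%8; if i < n: out[cy*w+cx] = pixels[i]'
def untileAltStep (pixels : List Int) (w_tiles w n : Int) (cy : Int) (out : List Int) (cx : Int) : List Int :=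
  let i := (PySem.Int.floordiv cy 8 * w_tiles + PySem.Int.floordiv cx 8) * 64 +
    PySem.Int.mod cy 8 * 8 + PySem.Int.mod cx 8
  if i < n then PySem.List.pySetD out (cy * w + cx) (PySem.List.pyGetD pixels i 0) else out

def untile_alt (pixels : List Int) (w_tiles : Int) (h_tiles : Int) : List Int :=
  let w := w_tiles * 8
  let h := h_tiles * 8
  let n : Int := pixels.length
  let out : List Int := List.replicate (w * h).toNat 0
  (PySem.List.pyRange 0 h 1).foldl (fun out cy =>
    (PySem.List.pyRange 0 w 1).foldl (untileAltStep pixels w_tiles w n cy) out) out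

-- ===== PRECONDITION & SPEC =====
-- Pre_ excludes exactly the inputs on which CPython cannot build the output list: '[0] * (w * h)'
-- raises OverflowError (list length above sys.maxsize = 2^63-1) in BOTH A and my B, so neither
-- Python returns outside Pre_; no input on which A returns a value is excluded.
def Pre_untile (pixels : List Int) (w_tiles : Int) (h_tiles : Int) : Prop :=
  (w_tiles * 8) * (h_tiles * 8) ≤ 9223372036854775807
instance (pixels : List Int) (w_tiles : Int) (h_tiles : Int) : Decidable (Pre_untile pixels w_tiles h_tiles) := by unfold Pre_untile; infer_instance
def pvWitness_untile : List Int × Int × Int := ([1, 2, 3, 4], 1, 1)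

def Spec_untile (pixels : List Int) (w_tiles : Int) (h_tiles : Int) (out : List Int) : Prop := out = untile_alt pixels w_tiles h_tiles
instance (pixels : List Int) (w_tiles : Int) (h_tiles : Int) (out : List Int) : Decidable (Spec_untile pixels w_tiles h_tiles out) := by unfold Spec_untile; infer_instance

-- ===== CLAIM (what is proved, stated in full; the proofs are below) =====
def Claim_equal_untile : Prop := ∀ (pixels : List Int) (w_tiles : Int) (h_tiles : Int), Dom_untile pixels w_tiles h_tiles → Pre_untile pixels w_tiles h_tiles → Spec_untile pixels w_tiles h_tiles (untile pixels w_tiles h_tiles)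

-- ===== LEMMAS AND PROOFS =====

-- apply a list of (position, value) writes to a list, in order
def applyW (o : List Int) (L : List (Nat × Int)) : List Int :=
  L.foldl (fun o pv => o.set pv.1 pv.2) o

-- one guarded write: position q, source index i ('if i < len(pixels)')
def wr (pixels : List Int) (q i : Nat) : Option (Nat × Int) :=
  if i < pixels.length then some (q, pixels.getD i 0) else none

-- the writes A performs, in A's (tile-major) order
def LA (pixels : List Int) (Wt Ht : Nat) : List (Nat × Int) :=
  (List.range Ht).flatMap fun ty => (List.range Wt).flatMap fun tx =>
    (List.range 8).flatMap fun py => (List.range 8).filterMap fun px =>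
      wr pixels ((ty * 8 + py) * (Wt * 8) + (tx * 8 + px))
        (0 + ty * (Wt * 64) + tx * 64 + py * 8 + px)

-- the writes B performs, in B's (scanline) order
def LB (pixels : List Int) (Wt Ht : Nat) : List (Nat × Int) :=
  (List.range (Ht * 8)).flatMap fun cy => (List.range (Wt * 8)).filterMap fun cx =>
    wr pixels (cy * (Wt * 8) + cx) ((cy / 8 * Wt + cx / 8) * 64 + cy % 8 * 8 + cx % 8)

theorem map_fst_wr (pixels : List Int) (q i : Nat) :
    (wr pixels q i).map Prod.fst = if i < pixels.length then some q else none := by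
  simp [wr, apply_ite]

theorem applyW_append (o : List Int) (L1 L2 : List (Nat × Int)) :
    applyW o (L1 ++ L2) = applyW (applyW o L1) L2 := by
  simp [applyW, List.foldl_append]

theorem foldl_id {α β : Type} (l : List α) (s : β) : l.foldl (fun a _ => a) s = s := by
  induction l <;> simp_all

theorem pyR8 : PySem.List.pyRange 0 8 1 = (List.range 8).map (fun (k : Nat) => (k : Int)) := by decide

theorem getElem?_applyW_not_mem (o : List Int) (L : List (Nat × Int)) (q : Nat)
    (h : q ∉ L.map Prod.fst) : (applyW o L)[q]? = o[q]? := by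
  induction L generalizing o with
  | nil => rfl
  | cons pv L ih =>
    simp only [List.map_cons, List.mem_cons, not_or] at h
    calc (applyW o (pv :: L))[q]? = (applyW (o.set pv.1 pv.2) L)[q]? := rfl
      _ = (o.set pv.1 pv.2)[q]? := ih _ h.2
      _ = o[q]? := List.getElem?_set_ne (fun hq => h.1 hq.symm)

theorem getElem?_applyW (o : List Int) (L : List (Nat × Int))
    (hk : ∀ pv ∈ L, pv.1 < o.length) (hnd : (L.map Prod.fst).Nodup) (q : Nat) :
    (applyW o L)[q]? = (L.find? (fun pv => pv.1 == q)).elim o[q]? (fun pv => some pv.2) := by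
  induction L generalizing o with
  | nil => rfl
  | cons pv L ih =>
    have hstep : applyW o (pv :: L) = applyW (o.set pv.1 pv.2) L := rfl
    simp only [List.map_cons, List.nodup_cons] at hnd
    by_cases hq : pv.1 = q
    · rw [hstep, getElem?_applyW_not_mem _ _ _ (hq ▸ hnd.1)]
      rw [List.find?_cons_of_pos (by simp [hq])]
      rw [← hq, List.getElem?_set_self (hk pv (by simp))]
      rfl
    · rw [hstep, ih _ (fun pv' h' => by simpa using hk pv' (List.mem_cons_of_mem _ h')) hnd.2]
      rw [List.find?_cons_of_neg (by simp [hq])]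
      rcases hfind : L.find? (fun pv => pv.1 == q) with _ | pv'
      · simp [hfind, List.getElem?_set_ne hq]
      · simp [hfind]

theorem find?_key_of_mem_nodup (L : List (Nat × Int)) (q : Nat) (v : Int)
    (hnd : (L.map Prod.fst).Nodup) (hm : (q, v) ∈ L) :
    L.find? (fun pv => pv.1 == q) = some (q, v) := by
  induction L with
  | nil => cases hm
  | cons hd tl ih =>
    simp only [List.map_cons, List.nodup_cons] at hnd
    rcases List.mem_cons.mp hm with h | h
    · rw [List.find?_cons_of_pos (by simp [← h])]
      exact congrArg some h.symm
    · have hne : hd.1 ≠ q := by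
        intro he
        exact hnd.1 (he ▸ List.mem_map_of_mem (f := Prod.fst) h)
      rw [List.find?_cons_of_neg (by simp [hne])]
      exact ih hnd.2 h

theorem find?_eq_of_mem_iff (L1 L2 : List (Nat × Int))
    (hmem : ∀ pv, pv ∈ L1 ↔ pv ∈ L2) (hnd2 : (L2.map Prod.fst).Nodup) (q : Nat) :
    L1.find? (fun pv => pv.1 == q) = L2.find? (fun pv => pv.1 == q) := by
  rcases h1 : L1.find? (fun pv => pv.1 == q) with _ | pv
  · rcases h2 : L2.find? (fun pv => pv.1 == q) with _ | pv
    · rw [h1, h2]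
    · exfalso
      have hm : pv ∈ L1 := (hmem pv).mpr (List.mem_of_find?_eq_some h2)
      have := List.find?_eq_none.mp h1 pv hm
      have hp := List.find?_some h2
      exact this hp
  · have hm : pv ∈ L2 := (hmem pv).mp (List.mem_of_find?_eq_some h1)
    have hp : pv.1 = q := by simpa using List.find?_some h1
    have hpair : (q, pv.2) = pv := by rw [← hp]
    rw [h1, find?_key_of_mem_nodup L2 q pv.2 hnd2 (by rw [hpair]; exact hm), hpair]

theorem applyW_eq_of (o : List Int) (L1 L2 : List (Nat × Int))
    (h1 : ∀ pv ∈ L1, pv.1 < o.length) (h2 : ∀ pv ∈ L2, pv.1 < o.length)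
    (hnd1 : (L1.map Prod.fst).Nodup) (hnd2 : (L2.map Prod.fst).Nodup)
    (hmem : ∀ pv, pv ∈ L1 ↔ pv ∈ L2) : applyW o L1 = applyW o L2 := by
  apply List.ext_getElem?
  intro q
  rw [getElem?_applyW o L1 h1 hnd1 q, getElem?_applyW o L2 h2 hnd2 q,
    find?_eq_of_mem_iff L1 L2 hmem hnd2 q]

-- ===== the writes A performs =====

theorem Astep (pixels : List Int) (Wt ty tx py px : Nat) (o : List Int) (d : Nat) :
    untileStep pixels ((Wt : Int) * 8) (ty : Int) (tx : Int) (py : Int) (o, (d : Int)) (px : Int)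
    = (applyW o (wr pixels ((ty * 8 + py) * (Wt * 8) + (tx * 8 + px)) d).toList,
        ((d + 1 : Nat) : Int)) := by
  simp only [untileStep, wr]
  by_cases hN : d < pixels.length
  · have hcast : ((ty : Int) * 8 + (py : Int)) * ((Wt : Int) * 8) + ((tx : Int) * 8 + (px : Int))
        = (((ty * 8 + py) * (Wt * 8) + (tx * 8 + px) : Nat) : Int) := by push_cast; ring
    rw [if_pos (by exact_mod_cast hN), if_pos hN, hcast, PySem.List.pySetD_natCast,
      PySem.List.pyGetD_natCast]
    simp [applyW]
  · rw [if_neg (by exact_mod_cast hN), if_neg hN]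
    simp [applyW]

theorem Apx (pixels : List Int) (Wt ty tx py : Nat) :
    ∀ (m : Nat) (o : List Int) (c : Nat),
    ((List.range m).map (fun (k : Nat) => (k : Int))).foldl
        (untileStep pixels ((Wt : Int) * 8) (ty : Int) (tx : Int) (py : Int)) (o, (c : Int))
    = (applyW o ((List.range m).filterMap fun px =>
        wr pixels ((ty * 8 + py) * (Wt * 8) + (tx * 8 + px)) (c + px)),
       ((c + m : Nat) : Int)) := by
  intro m
  induction m with
  | zero => intro o c; simp [applyW]
  | succ m ih =>
    intro o c
    rw [List.range_succ (n := m), List.map_append, List.foldl_append, ih, List.filterMap_append]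
    simp only [List.map_cons, List.map_nil, List.foldl_cons, List.foldl_nil,
      List.filterMap_cons, List.filterMap_nil]
    rw [Astep pixels Wt ty tx py m _ (c + m), applyW_append]
    refine congrArg₂ Prod.mk (congrArg _ ?_) rfl
    rcases h : wr pixels ((ty * 8 + py) * (Wt * 8) + (tx * 8 + m)) (c + m) with _ | x <;>
      simp [h]

theorem Apy (pixels : List Int) (Wt ty tx : Nat) :
    ∀ (m : Nat) (o : List Int) (c : Nat),
    ((List.range m).map (fun (k : Nat) => (k : Int))).foldl
        (fun s py => ((List.range 8).map (fun (k : Nat) => (k : Int))).foldl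
          (untileStep pixels ((Wt : Int) * 8) (ty : Int) (tx : Int) py) s) (o, (c : Int))
    = (applyW o ((List.range m).flatMap fun py => (List.range 8).filterMap fun px =>
        wr pixels ((ty * 8 + py) * (Wt * 8) + (tx * 8 + px)) (c + py * 8 + px)),
       ((c + m * 8 : Nat) : Int)) := by
  intro m
  induction m with
  | zero => intro o c; simp [applyW]
  | succ m ih =>
    intro o c
    rw [List.range_succ (n := m), List.map_append, List.foldl_append, ih, List.flatMap_append]
    simp only [List.map_cons, List.map_nil, List.foldl_cons, List.foldl_nil,
      List.flatMap_cons, List.flatMap_nil, List.append_nil]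
    rw [Apx pixels Wt ty tx m 8 _ (c + m * 8), applyW_append]
    refine congrArg₂ Prod.mk rfl ?_
    exact congrArg _ (by ring)

theorem Atx (pixels : List Int) (Wt ty : Nat) :
    ∀ (m : Nat) (o : List Int) (c : Nat),
    ((List.range m).map (fun (k : Nat) => (k : Int))).foldl
        (fun s tx => ((List.range 8).map (fun (k : Nat) => (k : Int))).foldl
          (fun s py => ((List.range 8).map (fun (k : Nat) => (k : Int))).foldl
            (untileStep pixels ((Wt : Int) * 8) (ty : Int) tx py) s) s) (o, (c : Int))
    = (applyW o ((List.range m).flatMap fun tx => (List.range 8).flatMap fun py =>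
        (List.range 8).filterMap fun px =>
        wr pixels ((ty * 8 + py) * (Wt * 8) + (tx * 8 + px)) (c + tx * 64 + py * 8 + px)),
       ((c + m * 64 : Nat) : Int)) := by
  intro m
  induction m with
  | zero => intro o c; simp [applyW]
  | succ m ih =>
    intro o c
    rw [List.range_succ (n := m), List.map_append, List.foldl_append, ih, List.flatMap_append]
    simp only [List.map_cons, List.map_nil, List.foldl_cons, List.foldl_nil,
      List.flatMap_cons, List.flatMap_nil, List.append_nil]
    rw [Apy pixels Wt ty m 8 _ (c + m * 64), applyW_append]
    refine congrArg₂ Prod.mk rfl ?_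
    exact congrArg _ (by ring)

theorem Aty (pixels : List Int) (Wt : Nat) :
    ∀ (m : Nat) (o : List Int) (c : Nat),
    ((List.range m).map (fun (k : Nat) => (k : Int))).foldl
        (fun s ty => ((List.range Wt).map (fun (k : Nat) => (k : Int))).foldl
          (fun s tx => ((List.range 8).map (fun (k : Nat) => (k : Int))).foldl
            (fun s py => ((List.range 8).map (fun (k : Nat) => (k : Int))).foldl
              (untileStep pixels ((Wt : Int) * 8) ty tx py) s) s) s) (o, (c : Int))
    = (applyW o ((List.range m).flatMap fun ty => (List.range Wt).flatMap fun tx =>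
        (List.range 8).flatMap fun py => (List.range 8).filterMap fun px =>
        wr pixels ((ty * 8 + py) * (Wt * 8) + (tx * 8 + px))
          (c + ty * (Wt * 64) + tx * 64 + py * 8 + px)),
       ((c + m * (Wt * 64) : Nat) : Int)) := by
  intro m
  induction m with
  | zero => intro o c; simp [applyW]
  | succ m ih =>
    intro o c
    rw [List.range_succ (n := m), List.map_append, List.foldl_append, ih, List.flatMap_append]
    simp only [List.map_cons, List.map_nil, List.foldl_cons, List.foldl_nil,
      List.flatMap_cons, List.flatMap_nil, List.append_nil]
    rw [Atx pixels Wt m Wt _ (c + m * (Wt * 64)), applyW_append]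
    refine congrArg₂ Prod.mk rfl ?_
    exact congrArg _ (by ring)

theorem bridgeA (pixels : List Int) (wt ht : Int) :
    untile pixels wt ht
    = applyW (List.replicate ((wt * 8) * (ht * 8)).toNat 0) (LA pixels wt.toNat ht.toNat) := by
  unfold untile
  by_cases hht : ht ≤ 0
  · rw [PySem.List.pyRange_one_eq_nil hht]
    have h0 : ht.toNat = 0 := by omega
    simp [LA, h0, applyW]
  · push_neg at hht
    by_cases hwt : wt ≤ 0
    · simp only [PySem.List.pyRange_one_eq_nil hwt, List.foldl_nil]
      rw [foldl_id]
      have h0 : wt.toNat = 0 := by omega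
      have hLA : LA pixels wt.toNat ht.toNat = [] := by
        apply List.flatMap_eq_nil_iff.mpr
        intro x hx
        simp [h0]
      rw [hLA]
      rfl
    · push_neg at hwt
      lift wt to ℕ using le_of_lt hwt with Wt
      lift ht to ℕ using le_of_lt hht with Ht
      simp only [PySem.List.pyRange_zero_natCast, pyR8, Int.toNat_natCast]
      have h := Aty pixels Wt Ht (List.replicate (((Wt : Int) * 8) * ((Ht : Int) * 8)).toNat 0) 0
      simp only [Nat.cast_zero] at h
      rw [h]
      rfl

-- ===== the writes B performs =====

theorem Bstep (pixels : List Int) (Wt cy cx : Nat) (o : List Int) :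
    untileAltStep pixels (Wt : Int) (((Wt * 8 : Nat) : Int)) (pixels.length : Int) (cy : Int)
      o (cx : Int)
    = applyW o (wr pixels (cy * (Wt * 8) + cx)
        ((cy / 8 * Wt + cx / 8) * 64 + cy % 8 * 8 + cx % 8)).toList := by
  simp only [untileAltStep, wr]
  have h1 : PySem.Int.floordiv (cy : Int) 8 = ((cy / 8 : Nat) : Int) := by
    simpa using PySem.Int.floordiv_natCast cy 8
  have h2 : PySem.Int.mod (cy : Int) 8 = ((cy % 8 : Nat) : Int) := by
    simpa using PySem.Int.mod_natCast cy 8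
  have h3 : PySem.Int.floordiv (cx : Int) 8 = ((cx / 8 : Nat) : Int) := by
    simpa using PySem.Int.floordiv_natCast cx 8
  have h4 : PySem.Int.mod (cx : Int) 8 = ((cx % 8 : Nat) : Int) := by
    simpa using PySem.Int.mod_natCast cx 8
  rw [h1, h2, h3, h4]
  have hi : (((cy / 8 : Nat) : Int) * (Wt : Int) + ((cx / 8 : Nat) : Int)) * 64 +
      ((cy % 8 : Nat) : Int) * 8 + ((cx % 8 : Nat) : Int)
      = (((cy / 8 * Wt + cx / 8) * 64 + cy % 8 * 8 + cx % 8 : Nat) : Int) := by push_cast; ring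
  rw [hi]
  by_cases hN : (cy / 8 * Wt + cx / 8) * 64 + cy % 8 * 8 + cx % 8 < pixels.length
  · have hpos : (cy : Int) * ((Wt * 8 : Nat) : Int) + (cx : Int)
        = ((cy * (Wt * 8) + cx : Nat) : Int) := by push_cast; ring
    rw [if_pos (by exact_mod_cast hN), if_pos hN, hpos, PySem.List.pySetD_natCast,
      PySem.List.pyGetD_natCast]
    simp [applyW]
  · rw [if_neg (by exact_mod_cast hN), if_neg hN]
    simp [applyW]

theorem Bcx (pixels : List Int) (Wt cy : Nat) :
    ∀ (m : Nat) (o : List Int),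
    ((List.range m).map (fun (k : Nat) => (k : Int))).foldl
        (untileAltStep pixels (Wt : Int) (((Wt * 8 : Nat) : Int)) (pixels.length : Int)
          (cy : Int)) o
    = applyW o ((List.range m).filterMap fun cx =>
        wr pixels (cy * (Wt * 8) + cx) ((cy / 8 * Wt + cx / 8) * 64 + cy % 8 * 8 + cx % 8)) := by
  intro m
  induction m with
  | zero => intro o; simp [applyW]
  | succ m ih =>
    intro o
    rw [List.range_succ (n := m), List.map_append, List.foldl_append, ih, List.filterMap_append]
    simp only [List.map_cons, List.map_nil, List.foldl_cons, List.foldl_nil,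
      List.filterMap_cons, List.filterMap_nil]
    rw [Bstep pixels Wt cy m _, applyW_append]
    refine congrArg _ ?_
    rcases h : wr pixels (cy * (Wt * 8) + m)
        ((cy / 8 * Wt + m / 8) * 64 + cy % 8 * 8 + m % 8) with _ | x <;> simp [h]

theorem Bcy (pixels : List Int) (Wt : Nat) :
    ∀ (m : Nat) (o : List Int),
    ((List.range m).map (fun (k : Nat) => (k : Int))).foldl
        (fun out cy => ((List.range (Wt * 8)).map (fun (k : Nat) => (k : Int))).foldl
          (untileAltStep pixels (Wt : Int) (((Wt * 8 : Nat) : Int)) (pixels.length : Int) cy)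
          out) o
    = applyW o ((List.range m).flatMap fun cy => (List.range (Wt * 8)).filterMap fun cx =>
        wr pixels (cy * (Wt * 8) + cx) ((cy / 8 * Wt + cx / 8) * 64 + cy % 8 * 8 + cx % 8)) := by
  intro m
  induction m with
  | zero => intro o; simp [applyW]
  | succ m ih =>
    intro o
    rw [List.range_succ (n := m), List.map_append, List.foldl_append, ih, List.flatMap_append]
    simp only [List.map_cons, List.map_nil, List.foldl_cons, List.foldl_nil,
      List.flatMap_cons, List.flatMap_nil, List.append_nil]
    rw [Bcx pixels Wt m (Wt * 8) _, applyW_append]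

theorem bridgeB (pixels : List Int) (wt ht : Int) :
    untile_alt pixels wt ht
    = applyW (List.replicate ((wt * 8) * (ht * 8)).toNat 0) (LB pixels wt.toNat ht.toNat) := by
  unfold untile_alt
  dsimp only
  by_cases hht : ht ≤ 0
  · rw [PySem.List.pyRange_one_eq_nil (by omega : ht * 8 ≤ 0)]
    have h0 : ht.toNat = 0 := by omega
    simp [LB, h0, applyW]
  · push_neg at hht
    by_cases hwt : wt ≤ 0
    · simp only [PySem.List.pyRange_one_eq_nil (by omega : wt * 8 ≤ 0), List.foldl_nil]
      rw [foldl_id]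
      have h0 : wt.toNat = 0 := by omega
      have hLB : LB pixels wt.toNat ht.toNat = [] := by
        apply List.flatMap_eq_nil_iff.mpr
        intro x hx
        simp [h0]
      rw [hLB]
      rfl
    · push_neg at hwt
      lift wt to ℕ using le_of_lt hwt with Wt
      lift ht to ℕ using le_of_lt hht with Ht
      have hw : (Wt : Int) * 8 = ((Wt * 8 : Nat) : Int) := by push_cast; ring
      have hh : (Ht : Int) * 8 = ((Ht * 8 : Nat) : Int) := by push_cast; ring
      simp only [hw, hh, PySem.List.pyRange_zero_natCast, Int.toNat_natCast]
      rw [Bcy pixels Wt (Ht * 8) _]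
      rfl

-- ===== the two write lists agree =====

theorem decomp_unique {W a b c d : Nat} (hW : 0 < W) (hc : c < W) (hd : d < W)
    (h : a * W + c = b * W + d) : a = b ∧ c = d := by
  have h1 : a = (a * W + c) / W := by
    rw [Nat.mul_comm a W, Nat.mul_add_div hW, Nat.div_eq_of_lt hc]
    omega
  have h2 : b = (b * W + d) / W := by
    rw [Nat.mul_comm b W, Nat.mul_add_div hW, Nat.div_eq_of_lt hd]
    omega
  have hab : a = b := by rw [h1, h, ← h2]
  subst hab
  exact ⟨rfl, by omega⟩

theorem mem_LA_iff (pixels : List Int) (Wt Ht : Nat) (pv : Nat × Int) :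
    pv ∈ LA pixels Wt Ht ↔ ∃ ty, ty < Ht ∧ ∃ tx, tx < Wt ∧ ∃ py, py < 8 ∧ ∃ px, px < 8 ∧
      (0 + ty * (Wt * 64) + tx * 64 + py * 8 + px < pixels.length) ∧
      ((ty * 8 + py) * (Wt * 8) + (tx * 8 + px),
        pixels.getD (0 + ty * (Wt * 64) + tx * 64 + py * 8 + px) 0) = pv := by
  simp [LA, wr, List.mem_flatMap, List.mem_filterMap, List.mem_range,
    Option.ite_none_right_eq_some]

theorem mem_LB_iff (pixels : List Int) (Wt Ht : Nat) (pv : Nat × Int) :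
    pv ∈ LB pixels Wt Ht ↔ ∃ cy, cy < Ht * 8 ∧ ∃ cx, cx < Wt * 8 ∧
      ((cy / 8 * Wt + cx / 8) * 64 + cy % 8 * 8 + cx % 8 < pixels.length) ∧
      (cy * (Wt * 8) + cx,
        pixels.getD ((cy / 8 * Wt + cx / 8) * 64 + cy % 8 * 8 + cx % 8) 0) = pv := by
  simp [LB, wr, List.mem_flatMap, List.mem_filterMap, List.mem_range,
    Option.ite_none_right_eq_some]

theorem mem_LA_LB (pixels : List Int) (Wt Ht : Nat) (pv : Nat × Int) :
    pv ∈ LA pixels Wt Ht ↔ pv ∈ LB pixels Wt Ht := by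
  rw [mem_LA_iff, mem_LB_iff]
  constructor
  · rintro ⟨ty, hty, tx, htx, py, hpy, px, hpx, hN, rfl⟩
    refine ⟨ty * 8 + py, by omega, tx * 8 + px, by omega, ?_, ?_⟩
    · have e1 : (ty * 8 + py) / 8 = ty := by omega
      have e2 : (ty * 8 + py) % 8 = py := by omega
      have e3 : (tx * 8 + px) / 8 = tx := by omega
      have e4 : (tx * 8 + px) % 8 = px := by omega
      rw [e1, e2, e3, e4]
      have : (ty * Wt + tx) * 64 + py * 8 + px
          = 0 + ty * (Wt * 64) + tx * 64 + py * 8 + px := by ring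
      rw [this]
      exact hN
    · have e1 : (ty * 8 + py) / 8 = ty := by omega
      have e2 : (ty * 8 + py) % 8 = py := by omega
      have e3 : (tx * 8 + px) / 8 = tx := by omega
      have e4 : (tx * 8 + px) % 8 = px := by omega
      rw [e1, e2, e3, e4]
      have : (ty * Wt + tx) * 64 + py * 8 + px
          = 0 + ty * (Wt * 64) + tx * 64 + py * 8 + px := by ring
      rw [this]
  · rintro ⟨cy, hcy, cx, hcx, hN, rfl⟩
    refine ⟨cy / 8, by omega, cx / 8, by omega, cy % 8, by omega, cx % 8, by omega, ?_, ?_⟩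
    · have : 0 + cy / 8 * (Wt * 64) + cx / 8 * 64 + cy % 8 * 8 + cx % 8
          = (cy / 8 * Wt + cx / 8) * 64 + cy % 8 * 8 + cx % 8 := by ring
      rw [this]
      exact hN
    · have h5 : cy / 8 * 8 + cy % 8 = cy := by omega
      have h6 : cx / 8 * 8 + cx % 8 = cx := by omega
      have : 0 + cy / 8 * (Wt * 64) + cx / 8 * 64 + cy % 8 * 8 + cx % 8
          = (cy / 8 * Wt + cx / 8) * 64 + cy % 8 * 8 + cx % 8 := by ring
      rw [this, h5, h6]

theorem rowcol_lt {row col W H : Nat} (h1 : row < H) (h2 : col < W) :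
    row * W + col < W * H := by
  calc row * W + col < row * W + W := by omega
    _ = (row + 1) * W := by ring
    _ ≤ H * W := Nat.mul_le_mul_right W h1
    _ = W * H := Nat.mul_comm _ _

theorem keys_LB_lt (pixels : List Int) (Wt Ht : Nat) :
    ∀ pv ∈ LB pixels Wt Ht, pv.1 < (Wt * 8) * (Ht * 8) := by
  intro pv hpv
  rw [mem_LB_iff] at hpv
  obtain ⟨cy, hcy, cx, hcx, _, rfl⟩ := hpv
  exact rowcol_lt hcy hcx

theorem keys_LA_lt (pixels : List Int) (Wt Ht : Nat) :
    ∀ pv ∈ LA pixels Wt Ht, pv.1 < (Wt * 8) * (Ht * 8) := by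
  intro pv hpv
  exact keys_LB_lt pixels Wt Ht pv ((mem_LA_LB pixels Wt Ht pv).mp hpv)

theorem nodup_keys_flatMap {α : Type} (l : List α) (f : α → List (Nat × Int))
    (hn : ∀ x ∈ l, ((f x).map Prod.fst).Nodup)
    (hd : List.Pairwise (fun x y => ∀ p : Nat,
      p ∈ (f x).map Prod.fst → p ∉ (f y).map Prod.fst) l) :
    ((l.flatMap f).map Prod.fst).Nodup := by
  rw [List.map_flatMap, List.nodup_flatMap]
  refine ⟨hn, hd.imp ?_⟩
  intro a b h
  exact List.disjoint_left.mpr h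

theorem nodup_keys_filterMap_wr (pixels : List Int) (l : List Nat) (hl : l.Nodup)
    (q i : Nat → Nat) (hq : ∀ x ∈ l, ∀ y ∈ l, q x = q y → x = y) :
    (((l.filterMap fun x => wr pixels (q x) (i x)).map Prod.fst)).Nodup := by
  induction l with
  | nil => simp
  | cons hd tl ih =>
    simp only [List.nodup_cons] at hl
    rw [List.filterMap_cons]
    have htl : (((tl.filterMap fun x => wr pixels (q x) (i x)).map Prod.fst)).Nodup :=
      ih hl.2 (fun x hx y hy => hq x (List.mem_cons_of_mem _ hx) y (List.mem_cons_of_mem _ hy))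
    rcases h : wr pixels (q hd) (i hd) with _ | pv
    · exact htl
    · simp only [List.map_cons, List.nodup_cons]
      refine ⟨?_, htl⟩
      intro hmem
      simp only [List.mem_map, List.mem_filterMap] at hmem
      obtain ⟨pv', ⟨x, hx, hwx⟩, hfst⟩ := hmem
      have hqx : pv'.1 = q x := by
        simp only [wr, Option.ite_none_right_eq_some, Option.some.injEq] at hwx
        rw [← hwx.2]
      have hq1 : pv.1 = q hd := by
        simp only [wr, Option.ite_none_right_eq_some, Option.some.injEq] at h
        rw [← h.2]
      have : x = hd := hq x (List.mem_cons_of_mem _ hx) hd (List.mem_cons_self)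
        (by rw [← hqx, hfst, hq1])
      exact hl.1 (this ▸ hx)

theorem pairwise_range_of_lt {n : Nat} {R : Nat → Nat → Prop}
    (h : ∀ a b, a < n → b < n → a < b → R a b) : (List.range n).Pairwise R := by
  refine List.pairwise_lt_range.imp_of_mem ?_
  intro a b ha hb hab
  exact h a b (List.mem_range.mp ha) (List.mem_range.mp hb) hab

theorem key_mem_flatMap {α : Type} (l : List α) (f : α → List (Nat × Int)) (p : Nat)
    (h : p ∈ ((l.flatMap f).map Prod.fst)) : ∃ x ∈ l, p ∈ (f x).map Prod.fst := by
  rw [List.map_flatMap, List.mem_flatMap] at h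
  exact h

theorem key_mem_wr_filterMap {α : Type} (pixels : List Int) (l : List α)
    (q i : α → Nat) (p : Nat)
    (h : p ∈ ((l.filterMap fun x => wr pixels (q x) (i x)).map Prod.fst)) :
    ∃ x ∈ l, p = q x := by
  simp only [List.map_filterMap, List.mem_filterMap] at h
  obtain ⟨x, hx, hw⟩ := h
  refine ⟨x, hx, ?_⟩
  simp only [map_fst_wr, Option.ite_none_right_eq_some, Option.some.injEq] at hw
  exact hw.2.symm

theorem nodup_keys_LA (pixels : List Int) (Wt Ht : Nat) (hWt : 0 < Wt) :
    ((LA pixels Wt Ht).map Prod.fst).Nodup := by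
  unfold LA
  apply nodup_keys_flatMap
  · intro ty _
    apply nodup_keys_flatMap
    · intro tx htx
      simp only [List.mem_range] at htx
      apply nodup_keys_flatMap
      · intro py _
        apply nodup_keys_filterMap_wr pixels _ List.nodup_range
        intro x hx y hy hxy
        omega
      · apply pairwise_range_of_lt
        intro py1 py2 _ _ hlt p h1 h2
        obtain ⟨px1, hpx1, hp1⟩ := key_mem_wr_filterMap pixels _ _ _ p h1
        obtain ⟨px2, hpx2, hp2⟩ := key_mem_wr_filterMap pixels _ _ _ p h2
        simp only [List.mem_range] at hpx1 hpx2
        have heq : (ty * 8 + py1) * (Wt * 8) + (tx * 8 + px1)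
            = (ty * 8 + py2) * (Wt * 8) + (tx * 8 + px2) := by rw [← hp1, ← hp2]
        obtain ⟨hrow, _⟩ := decomp_unique (by omega : 0 < Wt * 8)
          (by omega : tx * 8 + px1 < Wt * 8) (by omega : tx * 8 + px2 < Wt * 8) heq
        omega
    · apply pairwise_range_of_lt
      intro tx1 tx2 htx1 htx2 hlt p h1 h2
      obtain ⟨py1, _, hin1⟩ := key_mem_flatMap _ _ p h1
      obtain ⟨py2, _, hin2⟩ := key_mem_flatMap _ _ p h2
      obtain ⟨px1, hpx1, hp1⟩ := key_mem_wr_filterMap pixels _ _ _ p hin1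
      obtain ⟨px2, hpx2, hp2⟩ := key_mem_wr_filterMap pixels _ _ _ p hin2
      simp only [List.mem_range] at hpx1 hpx2
      have heq : (ty * 8 + py1) * (Wt * 8) + (tx1 * 8 + px1)
          = (ty * 8 + py2) * (Wt * 8) + (tx2 * 8 + px2) := by rw [← hp1, ← hp2]
      obtain ⟨hrow, hcol⟩ := decomp_unique (by omega : 0 < Wt * 8)
        (by omega : tx1 * 8 + px1 < Wt * 8) (by omega : tx2 * 8 + px2 < Wt * 8) heq
      omega
  · apply pairwise_range_of_lt
    intro ty1 ty2 _ _ hlt p h1 h2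
    obtain ⟨tx1, htx1, hmid1⟩ := key_mem_flatMap _ _ p h1
    obtain ⟨tx2, htx2, hmid2⟩ := key_mem_flatMap _ _ p h2
    obtain ⟨py1, hpy1, hin1⟩ := key_mem_flatMap _ _ p hmid1
    obtain ⟨py2, hpy2, hin2⟩ := key_mem_flatMap _ _ p hmid2
    obtain ⟨px1, hpx1, hp1⟩ := key_mem_wr_filterMap pixels _ _ _ p hin1
    obtain ⟨px2, hpx2, hp2⟩ := key_mem_wr_filterMap pixels _ _ _ p hin2
    simp only [List.mem_range] at hpx1 hpx2 htx1 htx2 hpy1 hpy2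
    have heq : (ty1 * 8 + py1) * (Wt * 8) + (tx1 * 8 + px1)
        = (ty2 * 8 + py2) * (Wt * 8) + (tx2 * 8 + px2) := by rw [← hp1, ← hp2]
    obtain ⟨hrow, _⟩ := decomp_unique (by omega : 0 < Wt * 8)
      (by omega : tx1 * 8 + px1 < Wt * 8) (by omega : tx2 * 8 + px2 < Wt * 8) heq
    omega

theorem nodup_keys_LB (pixels : List Int) (Wt Ht : Nat) :
    ((LB pixels Wt Ht).map Prod.fst).Nodup := by
  unfold LB
  apply nodup_keys_flatMap
  · intro cy _
    apply nodup_keys_filterMap_wr pixels _ List.nodup_range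
    intro x hx y hy hxy
    omega
  · apply pairwise_range_of_lt
    intro cy1 cy2 _ _ hlt p h1 h2
    obtain ⟨cx1, hcx1, hp1⟩ := key_mem_wr_filterMap pixels _ _ _ p h1
    obtain ⟨cx2, hcx2, hp2⟩ := key_mem_wr_filterMap pixels _ _ _ p h2
    simp only [List.mem_range] at hcx1 hcx2
    have heq : cy1 * (Wt * 8) + cx1 = cy2 * (Wt * 8) + cx2 := by rw [← hp1, ← hp2]
    by_cases hW : 0 < Wt
    · obtain ⟨hrow, _⟩ := decomp_unique (by omega : 0 < Wt * 8) hcx1 hcx2 heq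
      omega
    · omega

theorem untile_eq_alt (pixels : List Int) (wt ht : Int) :
    untile pixels wt ht = untile_alt pixels wt ht := by
  rw [bridgeA, bridgeB]
  by_cases hwt : 0 < wt
  · by_cases hht : 0 < ht
    · have hlen : ((wt * 8) * (ht * 8)).toNat = (wt.toNat * 8) * (ht.toNat * 8) := by
        lift wt to ℕ using le_of_lt hwt with Wt
        lift ht to ℕ using le_of_lt hht with Ht
        have h : (Wt : Int) * 8 * ((Ht : Int) * 8) = (((Wt * 8) * (Ht * 8) : Nat) : Int) := by
          push_cast; ring
        rw [h, Int.toNat_natCast, Int.toNat_natCast, Int.toNat_natCast]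
      apply applyW_eq_of
      · intro pv h
        rw [List.length_replicate, hlen]
        exact keys_LA_lt pixels _ _ pv h
      · intro pv h
        rw [List.length_replicate, hlen]
        exact keys_LB_lt pixels _ _ pv h
      · exact nodup_keys_LA pixels _ _ (by omega)
      · exact nodup_keys_LB pixels _ _
      · exact mem_LA_LB pixels _ _
    · have h0 : ht.toNat = 0 := by omega
      simp [LA, LB, h0]
  · have h0 : wt.toNat = 0 := by omega
    have hLA : LA pixels wt.toNat ht.toNat = [] :=
      List.flatMap_eq_nil_iff.mpr (by intro x hx; simp [h0])
    have hLB : LB pixels wt.toNat ht.toNat = [] :=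
      List.flatMap_eq_nil_iff.mpr (by intro x hx; simp [h0])
    rw [hLA, hLB]

-- ===== VERDICT (by name: the statement is the Claim_ definition above) =====
theorem untile_spec : Claim_equal_untile := by
  intro pixels wt ht _ _
  unfold Spec_untile
  exact untile_eq_alt pixels wt ht
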